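-- pv_equiv track=rewrite | github.com/informatiquecsud/sqlite-dbs | generate_sql_question.py | parse_runestone_activecode_sql
-- ===== SOURCE A (Python) =====
-- def parse_runestone_activecode_sql(activecode):
--     lines = activecode.strip().split('\n')
--
--     id = ''
--     dburl = ''
--
--     state = 'read header'
--     consigne = ''
--     sql = ''
--
--     nb_indent_spaces = 0
--     indentation = ''
--
--
--     for line in lines:
--         if state == 'read header' and line.startswith('..  activecode::'):
--             id = line.split('..  activecode:: ')[1]
--             nb_indent_spaces = line.index('..  activecode')
--             indentation = line[:nb_indent_spaces]
--         elif state == 'read header' and line.strip().startswith(':dburl:'):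
--             dburl = line.strip().split(':dburl:')[1]
--         elif state == 'read header' and line.strip() == '':
--             state = 'read consigne'
--         elif state == 'read consigne' and line.strip().startswith('~~~~'):
--             state = 'read sql'
--
--         elif state == 'read consigne':
--             consigne += line[nb_indent_spaces + 4:] + '\n'
--         elif state == 'read sql':
--             sql += line[nb_indent_spaces + 4:]  + '\n'
--
--     return consigne, sql, id
-- ===== SOURCE B (Python) =====
-- def _split_at_first(pred, lines):
--     """(lines before first match, lines after it); (lines, []) if no match."""
--     for i, line in enumerate(lines):
--         if pred(line):
--             return lines[:i], lines[i + 1:]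
--     return lines, []
--
--
-- def parse_runestone_activecode_sql(activecode):
--     lines = activecode.strip().split('\n')
--     # header = everything before the first blank line
--     header, rest = _split_at_first(lambda l: l.strip() == '', lines)
--     # consigne = rest up to the first '~~~~' separator, sql = what follows it
--     consigne_lines, sql_lines = _split_at_first(
--         lambda l: l.strip().startswith('~~~~'), rest)
--     id = ''
--     for line in header:
--         if line.startswith('..  activecode::'):
--             id = line.split('..  activecode:: ')[1]
--     consigne = ''
--     for line in consigne_lines:
--         consigne += line[4:] + '\n'
--     sql = ''
--     for line in sql_lines:
--         sql += line[4:] + '\n'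
--     return consigne, sql, id
-- ===== Notes on version B (the rewrite author's own statement) =====
-- stated objective: simpler
-- what changed: Replaces the single three-state stateful loop by two structural splits -- at the first blank line (header vs body) and at the first '~~~~' line (consigne vs sql) -- and then processes each slice independently.
-- outside the precondition, e.g. on parse_runestone_activecode_sql('..  activecode::'): A raises IndexError, B raises IndexError; on parse_runestone_activecode_sql('..  activecode:: '): A raises IndexError, B raises IndexError
import Mathlib
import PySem

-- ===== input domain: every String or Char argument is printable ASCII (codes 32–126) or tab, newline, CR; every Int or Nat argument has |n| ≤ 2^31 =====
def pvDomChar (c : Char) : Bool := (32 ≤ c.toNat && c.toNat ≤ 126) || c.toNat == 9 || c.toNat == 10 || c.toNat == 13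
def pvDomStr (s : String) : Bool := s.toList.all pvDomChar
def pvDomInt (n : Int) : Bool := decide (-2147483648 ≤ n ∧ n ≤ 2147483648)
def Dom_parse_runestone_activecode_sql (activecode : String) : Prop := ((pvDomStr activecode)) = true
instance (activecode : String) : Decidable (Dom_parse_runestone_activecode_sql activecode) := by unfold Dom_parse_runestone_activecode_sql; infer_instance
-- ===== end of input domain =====

-- B replaces A's three-state loop by two explicit splits (first blank line, first '~~~~' line)
-- and processes the three slices independently; same return value, objective: simpler decomposition.

-- ===== PORT A =====
-- the string literals of both Pythons, as char lists
def pvTokAC : List Char := "..  activecode::".toList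
def pvTokACSep : List Char := "..  activecode:: ".toList
def pvTokFind : List Char := "..  activecode".toList
def pvTokDburl : List Char := ":dburl:".toList
def pvTokTilde : List Char := "~~~~".toList

-- the loop state of A: id, dburl, state, consigne, sql, nb_indent_spaces, indentation
structure PvSt where
  id : List Char
  dburl : List Char
  state : String
  consigne : List Char
  sql : List Char
  nb : Int
  indentation : List Char
deriving Repr, DecidableEq

def pvStepA (st : PvSt) (line : List Char) : PvSt :=
  if st.state == "read header" && PySem.Chars.startswith line pvTokAC then
    -- id = line.split('..  activecode:: ')[1] — Python raises IndexError when the separator is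
    -- absent; pyGet? is none exactly there and Pre_ excludes those inputs (getD is unreachable on Pre_)
    { st with
      id := (PySem.List.pyGet? (PySem.Chars.splitOn line pvTokACSep) 1).getD [],
      -- nb = line.index('..  activecode'): the substring is present (line starts with it), so find = index, no raise
      nb := PySem.Chars.find line pvTokFind,
      indentation := PySem.Chars.slice line none (some (PySem.Chars.find line pvTokFind)) }
  else if st.state == "read header" && PySem.Chars.startswith (PySem.Chars.strip line) pvTokDburl then
    -- the separator is a prefix of the stripped line, so split has ≥ 2 pieces and [1] cannot raise
    { st with dburl := (PySem.List.pyGet? (PySem.Chars.splitOn (PySem.Chars.strip line) pvTokDburl) 1).getD [] }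
  else if st.state == "read header" && (PySem.Chars.strip line == []) then
    { st with state := "read consigne" }
  else if st.state == "read consigne" && PySem.Chars.startswith (PySem.Chars.strip line) pvTokTilde then
    { st with state := "read sql" }
  else if st.state == "read consigne" then
    { st with consigne := st.consigne ++ (PySem.Chars.slice line (some (st.nb + 4)) none ++ ['\n']) }
  else if st.state == "read sql" then
    { st with sql := st.sql ++ (PySem.Chars.slice line (some (st.nb + 4)) none ++ ['\n']) }
  else st

def parse_runestone_activecode_sql (activecode : String) : String × String × String :=
  let lines := PySem.Chars.splitOn (PySem.Chars.strip activecode.toList) "\n".toList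
  let st := lines.foldl pvStepA ⟨[], [], "read header", [], [], 0, []⟩
  (String.ofList st.consigne, String.ofList st.sql, String.ofList st.id)

-- ===== PORT B =====
-- B's helper _split_at_first(pred, lines): (lines before first match, lines after it)
def pvSplitAtFirst (p : List Char → Bool) : List (List Char) → List (List Char) × List (List Char)
  | [] => ([], [])
  | l :: ls =>
    if p l then ([], ls)
    else
      let r := pvSplitAtFirst p ls
      (l :: r.1, r.2)

def pvIsBlank (l : List Char) : Bool := PySem.Chars.strip l == []

def pvIsSep (l : List Char) : Bool := PySem.Chars.startswith (PySem.Chars.strip l) pvTokTilde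

-- B's id loop body: if line.startswith('..  activecode::'): id = line.split('..  activecode:: ')[1]
def pvIdUpd (acc : List Char) (line : List Char) : List Char :=
  if PySem.Chars.startswith line pvTokAC then
    (PySem.List.pyGet? (PySem.Chars.splitOn line pvTokACSep) 1).getD []
  else acc

-- B's accumulation loop body: acc += line[4:] + '\n'
def pvTail4 (acc : List Char) (line : List Char) : List Char :=
  acc ++ (PySem.Chars.slice line (some 4) none ++ ['\n'])

def parse_runestone_activecode_sql_alt (activecode : String) : String × String × String :=
  let lines := PySem.Chars.splitOn (PySem.Chars.strip activecode.toList) "\n".toList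
  let hr := pvSplitAtFirst pvIsBlank lines
  let cs := pvSplitAtFirst pvIsSep hr.2
  let id := hr.1.foldl pvIdUpd []
  let consigne := cs.1.foldl pvTail4 []
  let sql := cs.2.foldl pvTail4 []
  (String.ofList consigne, String.ofList sql, String.ofList id)

-- ===== PRECONDITION & SPEC =====
-- Pre_ excludes exactly the inputs on which Python A raises IndexError: a line in the header
-- section (before the first blank line) that starts with '..  activecode::' but not with
-- '..  activecode:: ' makes line.split('..  activecode:: ')[1] fail (B raises there too).
def Pre_parse_runestone_activecode_sql (activecode : String) : Prop :=
  ∀ l ∈ (PySem.Chars.splitOn (PySem.Chars.strip activecode.toList) "\n".toList).takeWhile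
        (fun l => !(PySem.Chars.strip l == [])),
    PySem.Chars.startswith l pvTokAC = true →
    PySem.Chars.startswith l pvTokACSep = true
instance (activecode : String) : Decidable (Pre_parse_runestone_activecode_sql activecode) := by
  unfold Pre_parse_runestone_activecode_sql; infer_instance

def pvWitness_parse_runestone_activecode_sql : String :=
  "..  activecode:: q1\n    :dburl: db\n\n    Who is there?\n    ~~~~\n    SELECT 1;"

def Spec_parse_runestone_activecode_sql (activecode : String) (out : String × String × String) : Prop := out = parse_runestone_activecode_sql_alt activecode
instance (activecode : String) (out : String × String × String) : Decidable (Spec_parse_runestone_activecode_sql activecode out) := by unfold Spec_parse_runestone_activecode_sql; infer_instance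

-- ===== CLAIM (what is proved, stated in full; the proofs are below) =====
def Claim_equal_parse_runestone_activecode_sql : Prop := ∀ (activecode : String), Dom_parse_runestone_activecode_sql activecode → Pre_parse_runestone_activecode_sql activecode → Spec_parse_runestone_activecode_sql activecode (parse_runestone_activecode_sql activecode)

-- ===== LEMMAS AND PROOFS =====

-- a line starting with '..  activecode::' is not blank (its first char '.' is not whitespace)
lemma pv_ac_not_blank (l : List Char)
    (h : PySem.Chars.startswith l pvTokAC = true) :
    (PySem.Chars.strip l == []) = false := by
  obtain ⟨t, rfl⟩ := (PySem.Chars.startswith_iff _ _).1 h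
  simp [pvTokAC, PySem.Chars.strip, PySem.Chars.lstrip, PySem.Chars.rstrip]
  rw [List.dropWhile_cons_of_neg (by decide)]
  exact ⟨'.', by simp, by decide⟩

-- nb = line.index('..  activecode') is 0 because the line starts with that substring
lemma pv_find_zero (l : List Char)
    (h : PySem.Chars.startswith l pvTokAC = true) :
    PySem.Chars.find l pvTokFind = 0 := by
  have hpre : pvTokFind <+: l :=
    List.IsPrefix.trans (by decide) ((PySem.Chars.startswith_iff _ _).1 h)
  have h0 : 0 ≤ PySem.Chars.find l pvTokFind :=
    (PySem.Chars.find_nonneg_iff _ _).2 hpre.isInfix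
  obtain ⟨-, hmin⟩ := PySem.Chars.find_spec h0
  by_contra hne
  exact hmin 0 (by omega) (by simpa using hpre)

-- phase 3: in state "read sql" every remaining line is appended to sql
lemma pv_sql_phase (ls : List (List Char)) : ∀ (id dburl c s ind : List Char),
    List.foldl pvStepA ⟨id, dburl, "read sql", c, s, 0, ind⟩ ls
      = ⟨id, dburl, "read sql", c, ls.foldl pvTail4 s, 0, ind⟩ := by
  induction ls with
  | nil => intros; rfl
  | cons l ls ih =>
    intro id dburl c s ind
    have : pvStepA ⟨id, dburl, "read sql", c, s, 0, ind⟩ l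
        = ⟨id, dburl, "read sql", c, pvTail4 s l, 0, ind⟩ := by
      simp [pvStepA, pvTail4]
    simp only [List.foldl_cons, this, ih]

-- phase 2: in state "read consigne", lines before the first '~~~~' join consigne, lines after it join sql
lemma pv_consigne_phase (ls : List (List Char)) : ∀ (id dburl c s ind : List Char),
    (let st := List.foldl pvStepA ⟨id, dburl, "read consigne", c, s, 0, ind⟩ ls
     (st.consigne, st.sql, st.id))
      = ((pvSplitAtFirst pvIsSep ls).1.foldl pvTail4 c,
         (pvSplitAtFirst pvIsSep ls).2.foldl pvTail4 s, id) := by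
  induction ls with
  | nil => intros; rfl
  | cons l ls ih =>
    intro id dburl c s ind
    by_cases hsep : pvIsSep l
    · have hsep' : PySem.Chars.startswith (PySem.Chars.strip l) pvTokTilde = true := by
        simpa [pvIsSep] using hsep
      have hstep : pvStepA ⟨id, dburl, "read consigne", c, s, 0, ind⟩ l
          = ⟨id, dburl, "read sql", c, s, 0, ind⟩ := by
        simp [pvStepA, hsep']
      simp only [List.foldl_cons, hstep, pv_sql_phase, pvSplitAtFirst, hsep, if_pos,
        List.foldl_nil]
    · have hstep : pvStepA ⟨id, dburl, "read consigne", c, s, 0, ind⟩ l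
          = ⟨id, dburl, "read consigne", pvTail4 c l, s, 0, ind⟩ := by
        have hsep' : PySem.Chars.startswith (PySem.Chars.strip l) pvTokTilde = false := by
          simpa [pvIsSep] using hsep
        simp [pvStepA, pvTail4, hsep']
      simp only [List.foldl_cons, hstep, ih, pvSplitAtFirst, hsep, if_neg, Bool.false_eq_true,
        not_false_iff]

-- phase 1: the header section is the lines before the first blank line; it only feeds id
lemma pv_header_phase (ls : List (List Char)) : ∀ (id dburl c s ind : List Char),
    (let st := List.foldl pvStepA ⟨id, dburl, "read header", c, s, 0, ind⟩ ls
     (st.consigne, st.sql, st.id))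
      = ((pvSplitAtFirst pvIsSep (pvSplitAtFirst pvIsBlank ls).2).1.foldl pvTail4 c,
         (pvSplitAtFirst pvIsSep (pvSplitAtFirst pvIsBlank ls).2).2.foldl pvTail4 s,
         (pvSplitAtFirst pvIsBlank ls).1.foldl pvIdUpd id) := by
  induction ls with
  | nil => intros; rfl
  | cons l ls ih =>
    intro id dburl c s ind
    by_cases hac : PySem.Chars.startswith l pvTokAC = true
    · have hnb : pvIsBlank l = false := by simpa [pvIsBlank] using pv_ac_not_blank l hac
      have hstep : pvStepA ⟨id, dburl, "read header", c, s, 0, ind⟩ l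
          = ⟨(PySem.List.pyGet? (PySem.Chars.splitOn l pvTokACSep) 1).getD [],
             dburl, "read header", c, s, 0,
             PySem.Chars.slice l none (some 0)⟩ := by
        simp [pvStepA, hac, pv_find_zero l hac]
      simp only [List.foldl_cons, hstep, ih, pvSplitAtFirst, hnb, Bool.false_eq_true, if_neg,
        not_false_iff]
      simp [pvIdUpd, hac]
    · by_cases hb : pvIsBlank l
      · have hs : PySem.Chars.strip l = [] := by simpa [pvIsBlank] using hb
        have hstep : pvStepA ⟨id, dburl, "read header", c, s, 0, ind⟩ l
            = ⟨id, dburl, "read consigne", c, s, 0, ind⟩ := by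
          simp [pvStepA, hac, hs,
            (by decide : PySem.Chars.startswith [] pvTokDburl = false)]

        simp only [List.foldl_cons, hstep, pv_consigne_phase, pvSplitAtFirst, hb, if_pos,
          List.foldl_nil]
      · have hstep : List.foldl pvStepA ⟨id, dburl, "read header", c, s, 0, ind⟩ (l :: ls)
            = List.foldl pvStepA
                ⟨id,
                 (if PySem.Chars.startswith (PySem.Chars.strip l) pvTokDburl then
                    (PySem.List.pyGet? (PySem.Chars.splitOn (PySem.Chars.strip l) pvTokDburl) 1).getD []
                  else dburl),
                 "read header", c, s, 0, ind⟩ ls := by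
          by_cases hd : PySem.Chars.startswith (PySem.Chars.strip l) pvTokDburl
          · simp [List.foldl_cons, pvStepA, hac, hd]
          · have hb' : (PySem.Chars.strip l == []) = false := by
              simpa [pvIsBlank] using hb
            simp [List.foldl_cons, pvStepA, hac, hd, hb']
        simp only [hstep, ih, pvSplitAtFirst, hb, Bool.false_eq_true, if_neg, not_false_iff]
        simp [pvIdUpd, hac]

-- ===== VERDICT (by name: the statement is the Claim_ definition above) =====
theorem parse_runestone_activecode_sql_spec : Claim_equal_parse_runestone_activecode_sql := by
  intro activecode _ _
  show _ = parse_runestone_activecode_sql_alt activecode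
  unfold parse_runestone_activecode_sql parse_runestone_activecode_sql_alt
  have h := pv_header_phase (PySem.Chars.splitOn (PySem.Chars.strip activecode.toList) "\n".toList)
    [] [] [] [] []
  simp only at h
  simp only [Prod.mk.injEq] at h
  simp only [h.1, h.2.1, h.2.2]
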